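-- pv_equiv track=rewrite | github.com/SuperInstance/quality-gate-stream | artifacts/py/modelexperiment-2-code-generation-results.py | validate_deadband_protocol
-- ===== SOURCE A (Python) =====
-- def validate_deadband_protocol(steps: list[str]) -> tuple[bool, str]:
--     """
--     Validate the Deadband Protocol steps.
--     The protocol requires:
--     - At least one P0 step
--     - No P2 step before a P1 step
--     """
--     # Check for P0
--     p0_present = any(step.startswith("P0:") for step in steps)
--     if not p0_present:
--         return (False, "P0 step missing")
--
--     # Check P2 before P1
--     p1_seen = False
--     for step in steps:
--         if step.startswith("P1:"):
--             p1_seen = True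
--         elif step.startswith("P2:") and not p1_seen:
--             return (False, "P2 before P1")
--
--     return (True, "")
-- ===== SOURCE B (Python) =====
-- def validate_deadband_protocol(steps: list[str]) -> tuple[bool, str]:
--     if not any(s.startswith("P0:") for s in steps):
--         return (False, "P0 step missing")
--     first_p1 = next((i for i, s in enumerate(steps) if s.startswith("P1:")), None)
--     first_p2 = next((i for i, s in enumerate(steps) if s.startswith("P2:")), None)
--     if first_p2 is not None and (first_p1 is None or first_p2 < first_p1):
--         return (False, "P2 before P1")
--     return (True, "")
-- ===== Notes on version B (the rewrite author's own statement) =====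
-- stated objective: alternative
-- what changed: Replaces A's stateful flag-scan over the steps with a positional comparison of the first 'P2:' index against the first 'P1:' index (found once each); same P0-guard-first error priority.
import Mathlib
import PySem

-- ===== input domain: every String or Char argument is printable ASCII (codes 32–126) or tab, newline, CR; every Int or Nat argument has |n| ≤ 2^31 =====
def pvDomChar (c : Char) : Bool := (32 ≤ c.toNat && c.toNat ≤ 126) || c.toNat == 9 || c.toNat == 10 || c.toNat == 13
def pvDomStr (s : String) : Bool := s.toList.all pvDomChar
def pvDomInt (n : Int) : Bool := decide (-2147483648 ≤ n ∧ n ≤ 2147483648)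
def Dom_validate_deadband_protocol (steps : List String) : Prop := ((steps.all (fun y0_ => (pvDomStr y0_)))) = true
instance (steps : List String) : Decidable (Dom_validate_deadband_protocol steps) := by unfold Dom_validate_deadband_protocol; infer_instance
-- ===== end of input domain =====

-- B replaces A's stateful flag-scan with a comparison of the first 'P2:' index against the first 'P1:' index (objective: alternative decomposition).

-- ===== PORT A =====
-- the `for step in steps` loop with its `p1_seen` flag
def vdpScanA : List String → Bool → Bool × String
  | [], _ => (true, "")
  | step :: rest, p1_seen =>
    if PySem.Str.startswith step "P1:" then vdpScanA rest true
    else if PySem.Str.startswith step "P2:" && !p1_seen then (false, "P2 before P1")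
    else vdpScanA rest p1_seen

def validate_deadband_protocol (steps : List String) : Bool × String :=
  let p0_present := steps.any (fun step => PySem.Str.startswith step "P0:")
  if !p0_present then (false, "P0 step missing")
  else vdpScanA steps false

-- ===== PORT B =====
def validate_deadband_protocol_alt (steps : List String) : Bool × String :=
  if !(steps.any (fun s => PySem.Str.startswith s "P0:")) then (false, "P0 step missing")
  else
    let first_p1 := steps.findIdx? (fun s => PySem.Str.startswith s "P1:")
    let first_p2 := steps.findIdx? (fun s => PySem.Str.startswith s "P2:")
    match first_p2, first_p1 with
    | some i2, some i1 => if i2 < i1 then (false, "P2 before P1") else (true, "")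
    | some _, none => (false, "P2 before P1")
    | none, _ => (true, "")

-- ===== PRECONDITION & SPEC =====
def Spec_validate_deadband_protocol (steps : List String) (out : Bool × String) : Prop := out = validate_deadband_protocol_alt steps
instance (steps : List String) (out : Bool × String) : Decidable (Spec_validate_deadband_protocol steps out) := by unfold Spec_validate_deadband_protocol; infer_instance

-- ===== CLAIM (what is proved, stated in full; the proofs are below) =====
def Claim_equal_validate_deadband_protocol : Prop := ∀ (steps : List String), Dom_validate_deadband_protocol steps → Spec_validate_deadband_protocol steps (validate_deadband_protocol steps)

-- ===== LEMMAS AND PROOFS =====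

-- a string cannot start with both "P1:" and "P2:"
lemma not_p1_p2 (s : String) (h1 : PySem.Str.startswith s "P1:" = true) :
    PySem.Str.startswith s "P2:" = false := by
  by_contra h
  rw [Bool.not_eq_false] at h
  simp only [PySem.Str.startswith_eq, PySem.Chars.startswith_iff] at h1 h
  have l1 : ("P1:".toList).length = ("P2:".toList).length := by decide
  have := List.prefix_of_prefix_length_le h1 h (by decide)
  have : "P1:".toList = "P2:".toList := List.IsPrefix.eq_of_length this l1
  simp at this

-- once p1_seen is true the scan always succeeds
lemma vdpScanA_true (steps : List String) : vdpScanA steps true = (true, "") := by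
  induction steps with
  | nil => rfl
  | cons s rest ih =>
    simp only [vdpScanA]
    split_ifs with h1 h2 <;> simp_all

-- A's flag-scan equals B's first-index comparison
lemma vdpScanA_eq (steps : List String) :
    vdpScanA steps false =
      (match steps.findIdx? (fun s => PySem.Str.startswith s "P2:"),
             steps.findIdx? (fun s => PySem.Str.startswith s "P1:") with
       | some i2, some i1 => if i2 < i1 then (false, "P2 before P1") else (true, "")
       | some _, none => (false, "P2 before P1")
       | none, _ => (true, "")) := by
  induction steps with
  | nil => rfl
  | cons s rest ih =>
    by_cases h1 : PySem.Str.startswith s "P1:" = true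
    · have h2 := not_p1_p2 s h1
      simp only [vdpScanA, h1, if_true, vdpScanA_true, List.findIdx?_cons, h2]
      cases hr : rest.findIdx? (fun s => PySem.Str.startswith s "P2:") <;> simp
    · by_cases h2 : PySem.Str.startswith s "P2:" = true
      · simp only [Bool.not_eq_true] at h1
        simp only [vdpScanA, h1, h2, List.findIdx?_cons, Bool.not_false, Bool.and_self, if_true, if_false, Bool.false_eq_true]
        cases hr : List.findIdx? (fun s => PySem.Str.startswith s "P1:") rest <;> simp
      · simp only [Bool.not_eq_true] at h1 h2
        simp only [vdpScanA, h1, h2, Bool.false_and, if_false, ih, List.findIdx?_cons]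
        cases hr1 : List.findIdx? (fun s => PySem.Str.startswith s "P1:") rest <;>
          cases hr2 : List.findIdx? (fun s => PySem.Str.startswith s "P2:") rest <;>
            simp [hr1, hr2]

-- ===== VERDICT (by name: the statement is the Claim_ definition above) =====
theorem validate_deadband_protocol_spec : Claim_equal_validate_deadband_protocol := by
  intro steps _
  unfold Spec_validate_deadband_protocol validate_deadband_protocol validate_deadband_protocol_alt
  by_cases h : (steps.any fun s => PySem.Str.startswith s "P0:") = true
  · simp only [h, Bool.not_true, Bool.false_eq_true, if_false]
    exact vdpScanA_eq steps
  · simp only [Bool.not_eq_true] at h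
    simp only [h, Bool.not_false, if_true]
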